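-- pv_equiv track=rewrite | github.com/BrunoGaoSZ/ljwx-deploy | scripts/ops/public_ingress_access.py | rank_addresses
-- ===== SOURCE A (Python) =====
-- def unique_preserve(items: list[str]) -> tuple[str, ...]:
--     seen: set[str] = set()
--     ordered: list[str] = []
--     for item in items:
--         if item in seen:
--             continue
--         seen.add(item)
--         ordered.append(item)
--     return tuple(ordered)
--
-- def rank_addresses(
--     addresses: tuple[str, ...],
--     local_ips: set[str],
--     prefer_address: str,
--     allow_local_address: bool,
-- ) -> tuple[str, ...]:
--     ranked: list[str] = []
--     if prefer_address and prefer_address in addresses: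
--         ranked.append(prefer_address)
--
--     remaining = [address for address in addresses if address not in ranked]
--     non_local = [address for address in remaining if address not in local_ips]
--     local = [address for address in remaining if address in local_ips]
--
--     ranked.extend(non_local)
--     if allow_local_address or not ranked:
--         ranked.extend(local)
--
--     return unique_preserve(ranked)
-- ===== SOURCE B (Python) =====
-- def rank_addresses(addresses, local_ips, prefer_address, allow_local_address):
--     def tier(a):
--         if prefer_address and a == prefer_address:
--             return 0
--         return 2 if a in local_ips else 1
--
--     buckets = ([], [], [])
--     for a in addresses:
--         buckets[tier(a)].append(a)
--
--     include_local = allow_local_address or (not buckets[0] and not buckets[1])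
--     ranked = buckets[0] + buckets[1] + (buckets[2] if include_local else [])
--     return tuple(dict.fromkeys(ranked))
-- ===== Notes on version B (the rewrite author's own statement) =====
-- stated objective: alternative
-- what changed: B replaces A's prefer-append plus three separate filter passes over the list by a single pass that assigns each address a tier (prefer/non-local/local) into three buckets, and replaces A's seen-set deduplication by membership in the output list.
import Mathlib
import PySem

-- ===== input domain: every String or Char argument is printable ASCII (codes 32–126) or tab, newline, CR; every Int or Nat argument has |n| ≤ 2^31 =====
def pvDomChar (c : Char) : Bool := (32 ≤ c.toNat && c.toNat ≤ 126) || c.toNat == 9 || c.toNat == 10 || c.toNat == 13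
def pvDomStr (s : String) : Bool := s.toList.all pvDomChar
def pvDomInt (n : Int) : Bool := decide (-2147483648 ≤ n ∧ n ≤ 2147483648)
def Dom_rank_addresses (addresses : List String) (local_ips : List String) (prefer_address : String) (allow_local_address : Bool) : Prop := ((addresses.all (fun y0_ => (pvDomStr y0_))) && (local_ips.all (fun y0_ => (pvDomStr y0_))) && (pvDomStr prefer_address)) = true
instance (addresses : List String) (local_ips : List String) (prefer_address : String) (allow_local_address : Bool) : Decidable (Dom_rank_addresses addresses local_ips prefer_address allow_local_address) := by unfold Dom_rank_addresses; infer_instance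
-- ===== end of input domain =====

-- B ranks addresses in one bucketing pass over a tier key (prefer / non-local / local) and
-- dedups via membership in the output list, instead of A's prefer-append plus three filter
-- passes and a seen-set dedup; objective: alternative decomposition, same cost.


-- ===== PORT A =====
def unique_preserve (items : List String) : List String :=
  (items.foldl
    (fun (st : PySem.Set String × List String) item =>
      if PySem.Set.contains st.1 item then st
      else (PySem.Set.add st.1 item, st.2 ++ [item]))
    (PySem.Set.empty, [])).2

def rank_addresses (addresses : List String) (local_ips : List String) (prefer_address : String) (allow_local_address : Bool) : List String :=
  let ranked : List String :=
    if prefer_address ≠ "" ∧ addresses.contains prefer_address then [prefer_address] else []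
  let remaining := addresses.filter (fun a => !ranked.contains a)
  let non_local := remaining.filter (fun a => !local_ips.contains a)
  let locals := remaining.filter (fun a => local_ips.contains a)
  let ranked2 := ranked ++ non_local
  let ranked3 := if allow_local_address || ranked2.isEmpty then ranked2 ++ locals else ranked2
  unique_preserve ranked3

-- ===== PORT B =====
def raTier (local_ips : List String) (prefer_address : String) (a : String) : Nat :=
  if prefer_address ≠ "" ∧ a = prefer_address then 0
  else if local_ips.contains a then 2 else 1

def raBuckets (local_ips : List String) (prefer_address : String) (addresses : List String) :
    List String × List String × List String :=
  addresses.foldl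
    (fun b a =>
      match raTier local_ips prefer_address a with
      | 0 => (b.1 ++ [a], b.2.1, b.2.2)
      | 2 => (b.1, b.2.1, b.2.2 ++ [a])
      | _ => (b.1, b.2.1 ++ [a], b.2.2))
    ([], [], [])

def rank_addresses_alt (addresses : List String) (local_ips : List String) (prefer_address : String) (allow_local_address : Bool) : List String :=
  let b := raBuckets local_ips prefer_address addresses
  let include_local := allow_local_address || (b.1.isEmpty && b.2.1.isEmpty)
  PySem.List.dedup (b.1 ++ b.2.1 ++ (if include_local then b.2.2 else []))


-- ===== PRECONDITION & SPEC =====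
def Spec_rank_addresses (addresses : List String) (local_ips : List String) (prefer_address : String) (allow_local_address : Bool) (out : List String) : Prop := out = rank_addresses_alt addresses local_ips prefer_address allow_local_address
instance (addresses : List String) (local_ips : List String) (prefer_address : String) (allow_local_address : Bool) (out : List String) : Decidable (Spec_rank_addresses addresses local_ips prefer_address allow_local_address out) := by unfold Spec_rank_addresses; infer_instance

-- ===== CLAIM (what is proved, stated in full; the proofs are below) =====
def Claim_equal_rank_addresses : Prop := ∀ (addresses : List String) (local_ips : List String) (prefer_address : String) (allow_local_address : Bool), Dom_rank_addresses addresses local_ips prefer_address allow_local_address → Spec_rank_addresses addresses local_ips prefer_address allow_local_address (rank_addresses addresses local_ips prefer_address allow_local_address)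

-- ===== LEMMAS AND PROOFS =====
theorem up_inv (items : List String) : ∀ (seen : PySem.Set String) (out : List String),
    (∀ x, PySem.Set.contains seen x = out.contains x) →
    (items.foldl
      (fun (st : PySem.Set String × List String) item =>
        if PySem.Set.contains st.1 item then st
        else (PySem.Set.add st.1 item, st.2 ++ [item])) (seen, out)).2
    = items.foldl (fun out a => if out.contains a then out else out ++ [a]) out := by
  induction items with
  | nil => intro seen out h; simp
  | cons a l ih =>
    intro seen out h
    by_cases hc : out.contains a = true
    · simp only [List.foldl_cons, h a, hc, if_pos]
      exact ih seen out h
    · simp only [List.foldl_cons, h a, hc, if_neg, Bool.false_eq_true, not_false_iff]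
      apply ih
      intro x
      have hout : a ∉ out := by simpa using hc
      have ha : a ∉ seen := by
        have := h a; simp [PySem.Set.contains] at this
        exact fun hm => hout (this.mp hm)
      have hx := h x
      simp [PySem.Set.add, PySem.Set.contains] at hx ⊢
      simp [ha, hx]

-- dict.fromkeys dedup as the explicit first-occurrence fold
theorem dedup_eq_foldl (l : List String) : PySem.List.dedup l
    = l.foldl (fun out a => if out.contains a then out else out ++ [a]) [] := by
  rw [PySem.List.dedup_eq_ofList, PySem.Set.ofList_eq_foldl]
  rfl

theorem unique_preserve_eq_dedup (items : List String) :
    unique_preserve items = PySem.List.dedup items := by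
  unfold unique_preserve
  rw [dedup_eq_foldl]
  exact up_inv items PySem.Set.empty [] (fun x => by simp [PySem.Set.contains, PySem.Set.empty])

theorem raBuckets_eq_filters (L : List String) (p : String) (xs : List String) :
    raBuckets L p xs =
      (xs.filter (fun a => raTier L p a == 0),
       xs.filter (fun a => raTier L p a == 1),
       xs.filter (fun a => raTier L p a == 2)) := by
  suffices h : ∀ (ys : List String) (b : List String × List String × List String),
      ys.foldl
        (fun b a =>
          match raTier L p a with
          | 0 => (b.1 ++ [a], b.2.1, b.2.2)
          | 2 => (b.1, b.2.1, b.2.2 ++ [a])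
          | _ => (b.1, b.2.1 ++ [a], b.2.2)) b
      = (b.1 ++ ys.filter (fun a => raTier L p a == 0),
         b.2.1 ++ ys.filter (fun a => raTier L p a == 1),
         b.2.2 ++ ys.filter (fun a => raTier L p a == 2)) by
    simpa [raBuckets] using h xs ([], [], [])
  intro ys
  induction ys with
  | nil => intro b; simp
  | cons a l ih =>
    intro b
    rw [List.foldl_cons, ih]
    by_cases h0 : p ≠ "" ∧ a = p
    · have ht : raTier L p a = 0 := by simp [raTier, h0]
      simp [ht]
    · by_cases h2 : L.contains a = true
      · have ht : raTier L p a = 2 := by simp [raTier, h0]; simpa using h2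
        simp [ht]
      · have ht : raTier L p a = 1 := by simp [raTier, h0]; simpa using h2
        simp [ht]

-- skipping copies already present in the accumulator
theorem dedup_skip (k : Nat) (p : String) : ∀ (acc : List String), acc.contains p = true →
    (List.replicate k p).foldl (fun out a => if out.contains a then out else out ++ [a]) acc = acc := by
  induction k with
  | zero => intro acc _; simp
  | succ n ih =>
    intro acc h
    rw [List.replicate_succ, List.foldl_cons, if_pos h]
    exact ih acc h

theorem dedup_replicate_head (k : Nat) (p : String) (t : List String) :
    PySem.List.dedup (List.replicate (k+1) p ++ t) = PySem.List.dedup ([p] ++ t) := by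
  rw [dedup_eq_foldl, dedup_eq_foldl]
  have h1 : (if ([]:List String).contains p = true then ([]:List String) else [] ++ [p]) = [p] := by
    simp
  rw [List.replicate_succ, List.cons_append, List.foldl_cons, List.foldl_append, h1,
      dedup_skip k p [p] (by simp), List.singleton_append, List.foldl_cons, h1]

-- A = B: case split on whether the prefer-guard fires; both sides reduce to tier filters and one dedup
theorem rank_addresses_eq_alt (addresses L : List String) (p : String) (allow : Bool) :
    rank_addresses addresses L p allow = rank_addresses_alt addresses L p allow := by
  by_cases hP : p ≠ "" ∧ addresses.contains p
  · obtain ⟨hp, hc⟩ := hP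
    have hpmem : p ∈ addresses := by simpa using hc
    have hF0 : addresses.filter (fun a => raTier L p a == 0)
        = addresses.filter (fun a => a == p) := by
      apply List.filter_congr; intro a _
      by_cases he : a = p <;> by_cases hl : a ∈ L <;> simp [raTier, hp, he, hl]
    have hall : ∀ b ∈ addresses.filter (fun a => a == p), b = p := by
      intro b hb; simpa using (List.mem_filter.mp hb).2
    have hpe : p ∈ addresses.filter (fun a => a == p) :=
      List.mem_filter.mpr ⟨hpmem, by simp⟩
    obtain ⟨k, hk'⟩ : ∃ k, (addresses.filter (fun a => a == p)).length = k + 1 := by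
      have := List.length_pos_of_mem hpe
      exact ⟨(addresses.filter (fun a => a == p)).length - 1, by omega⟩
    have hrep : addresses.filter (fun a => a == p) = List.replicate (k + 1) p := by
      rw [← hk']; exact List.eq_replicate_length.mpr hall
    have hF1 : addresses.filter (fun a => raTier L p a == 1)
        = (addresses.filter (fun a => !([p].contains a))).filter (fun a => !L.contains a) := by
      rw [List.filter_filter]
      apply List.filter_congr; intro a _
      by_cases he : a = p
      · simp [raTier, hp, he]
      · by_cases hl : a ∈ L <;> simp [raTier, hp, he, hl]
    have hF2 : addresses.filter (fun a => raTier L p a == 2)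
        = (addresses.filter (fun a => !([p].contains a))).filter (fun a => L.contains a) := by
      rw [List.filter_filter]
      apply List.filter_congr; intro a _
      by_cases he : a = p
      · simp [raTier, hp, he]
      · by_cases hl : a ∈ L <;> simp [raTier, hp, he, hl]
    simp only [rank_addresses, rank_addresses_alt, raBuckets_eq_filters,
      if_pos (And.intro hp hc), hF0, hF1, hF2, hrep,
      unique_preserve_eq_dedup]
    have key : ∀ t, PySem.List.dedup (List.replicate (k+1) p ++ t) = PySem.List.dedup (p :: t) := fun t => by
      simpa using dedup_replicate_head k p t
    have hre : (List.replicate (k+1) p).isEmpty = false := by simp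
    by_cases hA : allow = true
    · rw [if_pos (by simp [hA]), if_pos (by simp [hA]),
          List.append_assoc (List.replicate (k+1) p), key]
      simp
    · rw [if_neg (by simp [hA]), if_neg (by simp [hA, hre]), List.append_nil, key]
      simp
  · have hmem : ∀ a ∈ addresses, ¬(p ≠ "" ∧ a = p) := by
      intro a ha h
      exact hP ⟨h.1, by simpa using h.2 ▸ ha⟩
    have hF0 : addresses.filter (fun a => raTier L p a == 0) = [] := by
      rw [List.filter_eq_nil_iff]
      intro a ha
      by_cases hl : a ∈ L <;> simp [raTier, hmem a ha, hl]
    have hF1 : addresses.filter (fun a => raTier L p a == 1)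
        = addresses.filter (fun a => !L.contains a) := by
      apply List.filter_congr; intro a ha
      by_cases hl : a ∈ L <;> simp [raTier, hmem a ha, hl]
    have hF2 : addresses.filter (fun a => raTier L p a == 2)
        = addresses.filter (fun a => L.contains a) := by
      apply List.filter_congr; intro a ha
      by_cases hl : a ∈ L <;> simp [raTier, hmem a ha, hl]
    simp only [rank_addresses, rank_addresses_alt, raBuckets_eq_filters,
      if_neg hP, hF0, hF1, hF2, unique_preserve_eq_dedup]
    by_cases hA : allow = true
    · simp [hA]
    · by_cases hC : ∀ a ∈ addresses, a ∈ L
      · simp [hA]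
        rw [if_pos hC, if_pos hC]
      · simp [hA]
        rw [if_neg hC, if_neg hC, List.append_nil]

-- ===== VERDICT (by name: the statement is the Claim_ definition above) =====
theorem rank_addresses_spec : Claim_equal_rank_addresses := by
  intro addresses local_ips prefer_address allow_local_address _
  exact rank_addresses_eq_alt addresses local_ips prefer_address allow_local_address
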